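-- pv_equiv track=rewrite | github.com/dianamenesesg/HackerRank | Interview_Preparation_Kit/problem_solving.py | breakingRecords
-- ===== SOURCE A (Python) =====
-- def breakingRecords(scores):
--     worst, best = [], []
--     min_record = scores[0]
--     for score in scores[1:]:
--         if score > max(best+[min_record]) :
--             best.append(score)
--         elif score < min(worst+[min_record], default=0) :
--             worst.append(score)
--
--     return len(best), len(worst)
-- ===== SOURCE B (Python) =====
-- def breakingRecords(scores):
--     # table-building decomposition: prefix max/min tables, then two strict-comparison counting passes
--     hi = lo = scores[0]
--     pmax, pmin = [], []
--     for s in scores: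
--         hi = max(hi, s)
--         lo = min(lo, s)
--         pmax.append(hi)
--         pmin.append(lo)
--     best = sum(1 for a, b in zip(pmax[1:], pmax) if a > b)
--     worst = sum(1 for a, b in zip(pmin[1:], pmin) if a < b)
--     return best, worst
-- ===== Notes on version B (the rewrite author's own statement) =====
-- stated objective: faster
-- what changed: Replaces A's single branching loop that stores record values in two lists and recomputes max(best+[start])/min(worst+[start]) from scratch each iteration with a table-building decomposition: one pass builds prefix-max and prefix-min tables, then two zip passes count strict adjacent changes.
import Mathlib
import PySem

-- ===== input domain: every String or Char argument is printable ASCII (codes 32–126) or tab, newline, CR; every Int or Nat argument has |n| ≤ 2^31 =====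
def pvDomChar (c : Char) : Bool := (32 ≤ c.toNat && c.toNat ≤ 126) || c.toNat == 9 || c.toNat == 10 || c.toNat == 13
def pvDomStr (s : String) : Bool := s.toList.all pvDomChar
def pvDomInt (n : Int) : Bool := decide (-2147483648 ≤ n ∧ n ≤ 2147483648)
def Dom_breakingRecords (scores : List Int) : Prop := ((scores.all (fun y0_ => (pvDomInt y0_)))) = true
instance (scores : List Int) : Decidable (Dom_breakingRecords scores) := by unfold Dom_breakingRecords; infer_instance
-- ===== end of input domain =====

-- B replaces A's branching loop (which rescans its record lists via max/min each step) by a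
-- prefix-max/prefix-min table pass followed by two strict-comparison counting passes (objective: faster — A rescans its growing record lists each iteration, B is one pass plus two linear counting passes).

-- ===== PORT A =====
-- A's loop body, with min_record fixed (helper name only; same code as the Python loop body)
def pvAStep (minRecord : Int) (wb : List Int × List Int) (score : Int) : List Int × List Int :=
  if score > (PySem.List.max? (wb.2 ++ [minRecord]) (fun y => y)).getD 0 then
    (wb.1, wb.2 ++ [score])
  else if score < (PySem.List.min? (wb.1 ++ [minRecord]) (fun y => y)).getD 0 then
    (wb.1 ++ [score], wb.2)
  else wb

def breakingRecords (scores : List Int) : Int × Int :=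
  match scores with
  | [] => (0, 0)  -- scores[0] raises IndexError; excluded by Pre_
  | minRecord :: _ =>
    let r := (PySem.List.slice scores (some 1) none).foldl (pvAStep minRecord) ([], [])
    ((r.2.length : Int), (r.1.length : Int))

-- ===== PORT B =====
-- B's loop body: running hi/lo plus the pmax/pmin tables being appended to
def pvBStep (st : (Int × Int) × (List Int × List Int)) (s : Int) : (Int × Int) × (List Int × List Int) :=
  let hi := max st.1.1 s
  let lo := min st.1.2 s
  ((hi, lo), (st.2.1 ++ [hi], st.2.2 ++ [lo]))

def breakingRecords_alt (scores : List Int) : Int × Int :=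
  match scores with
  | [] => (0, 0)  -- scores[0] raises IndexError; excluded by Pre_
  | s0 :: _ =>
    let st := scores.foldl pvBStep ((s0, s0), ([], []))
    let pmax := st.2.1
    let pmin := st.2.2
    let best := ((PySem.List.slice pmax (some 1) none).zip pmax).foldl
      (fun acc ab => if ab.1 > ab.2 then acc + 1 else acc) (0 : Int)
    let worst := ((PySem.List.slice pmin (some 1) none).zip pmin).foldl
      (fun acc ab => if ab.1 < ab.2 then acc + 1 else acc) (0 : Int)
    (best, worst)

-- ===== PRECONDITION & SPEC =====
-- Pre_ excludes only the empty list, on which A raises IndexError (scores[0]); B raises there too.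
def Pre_breakingRecords (scores : List Int) : Prop := scores ≠ []
instance (scores : List Int) : Decidable (Pre_breakingRecords scores) := by unfold Pre_breakingRecords; infer_instance
def pvWitness_breakingRecords : List Int := [3, 1, 2]

def Spec_breakingRecords (scores : List Int) (out : Int × Int) : Prop := out = breakingRecords_alt scores
instance (scores : List Int) (out : Int × Int) : Decidable (Spec_breakingRecords scores out) := by unfold Spec_breakingRecords; infer_instance

-- ===== CLAIM (what is proved, stated in full; the proofs are below) =====
def Claim_equal_breakingRecords : Prop := ∀ (scores : List Int), Dom_breakingRecords scores → Pre_breakingRecords scores → Spec_breakingRecords scores (breakingRecords scores)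

-- ===== LEMMAS AND PROOFS =====

-- number of new-max records along rest, starting from running max c
def pvCntB (c : Int) : List Int → Int
  | [] => 0
  | s :: t => (if s > c then 1 else 0) + pvCntB (max c s) t

-- number of new-min records along rest, starting from running min c
def pvCntW (c : Int) : List Int → Int
  | [] => 0
  | s :: t => (if s < c then 1 else 0) + pvCntW (min c s) t

-- the scan of a binary op (prefix-max / prefix-min table for the tail)
def pvScan (f : Int → Int → Int) (c : Int) : List Int → List Int
  | [] => []
  | s :: t => f c s :: pvScan f (f c s) t

theorem pv_foldl_max_pair (l : List Int) : ∀ a b, max (l.foldl max a) b = l.foldl max (max a b) := by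
  induction l with
  | nil => intro a b; rfl
  | cons x t ih =>
      intro a b
      simp only [List.foldl_cons]
      rw [ih, max_right_comm]

theorem pv_foldl_min_pair (l : List Int) : ∀ a b, min (l.foldl min a) b = l.foldl min (min a b) := by
  induction l with
  | nil => intro a b; rfl
  | cons x t ih =>
      intro a b
      simp only [List.foldl_cons]
      rw [ih, min_right_comm]

theorem pv_maxD_eq (b : List Int) (m : Int) :
    (PySem.List.max? (b ++ [m]) (fun y => y)).getD 0 = b.foldl max m := by
  cases b with
  | nil => simp [PySem.List.max?_id_cons]
  | cons x b' =>
      rw [List.cons_append, PySem.List.max?_id_cons]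
      simp only [Option.getD_some, List.foldl_append, List.foldl_cons, List.foldl_nil]
      rw [max_comm m x]
      exact pv_foldl_max_pair b' x m

theorem pv_minD_eq (b : List Int) (m : Int) :
    (PySem.List.min? (b ++ [m]) (fun y => y)).getD 0 = b.foldl min m := by
  cases b with
  | nil => simp [PySem.List.min?_id_cons]
  | cons x b' =>
      rw [List.cons_append, PySem.List.min?_id_cons]
      simp only [Option.getD_some, List.foldl_append, List.foldl_cons, List.foldl_nil]
      rw [min_comm m x]
      exact pv_foldl_min_pair b' x m

-- A's fold counts exactly the new-max / new-min records
theorem pv_afold (m : Int) (rest : List Int) : ∀ (worst best : List Int),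
    best.foldl max m ≥ worst.foldl min m →
    ((rest.foldl (pvAStep m) (worst, best)).2.length : Int)
        = best.length + pvCntB (best.foldl max m) rest
    ∧ ((rest.foldl (pvAStep m) (worst, best)).1.length : Int)
        = worst.length + pvCntW (worst.foldl min m) rest := by
  induction rest with
  | nil => intro worst best _; simp [pvCntB, pvCntW]
  | cons s t ih =>
      intro worst best hle
      simp only [List.foldl_cons]
      by_cases hmax : s > best.foldl max m
      · have hstep : pvAStep m (worst, best) s = (worst, best ++ [s]) := by
          simp [pvAStep, pv_maxD_eq, hmax]
        have hnewmax : (best ++ [s]).foldl max m = max (best.foldl max m) s := by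
          simp [List.foldl_append]
        have hrec := ih worst (best ++ [s]) (by rw [hnewmax]; exact le_trans hle (le_max_left _ _))
        rw [hstep]
        constructor
        · rw [hrec.1, hnewmax]
          simp [pvCntB, hmax]
          omega
        · rw [hrec.2]
          have hns : ¬ s < worst.foldl min m := by omega
          simp [pvCntW, hns, min_eq_left (by omega : worst.foldl min m ≤ s)]
      · have hmaxeq : max (best.foldl max m) s = best.foldl max m :=
          max_eq_left (by omega)
        by_cases hmin : s < worst.foldl min m
        · have hstep : pvAStep m (worst, best) s = (worst ++ [s], best) := by
            simp [pvAStep, pv_maxD_eq, pv_minD_eq, hmax, hmin]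
          have hnewmin : (worst ++ [s]).foldl min m = min (worst.foldl min m) s := by
            simp [List.foldl_append]
          have hrec := ih (worst ++ [s]) best (by rw [hnewmin]; exact le_trans (min_le_left _ _) hle)
          rw [hstep]
          constructor
          · rw [hrec.1]
            simp [pvCntB, hmax, hmaxeq]
          · rw [hrec.2, hnewmin]
            simp [pvCntW, hmin]
            omega
        · have hstep : pvAStep m (worst, best) s = (worst, best) := by
            simp [pvAStep, pv_maxD_eq, pv_minD_eq, hmax, hmin]
          have hmineq : min (worst.foldl min m) s = worst.foldl min m :=
            min_eq_left (by omega)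
          have hrec := ih worst best hle
          rw [hstep]
          constructor
          · rw [hrec.1]; simp [pvCntB, hmax, hmaxeq]
          · rw [hrec.2]; simp [pvCntW, hmin, hmineq]

-- B's table-building fold produces the prefix-max / prefix-min scans
theorem pv_bfold (l : List Int) : ∀ (hi lo : Int) (pm pn : List Int),
    l.foldl pvBStep ((hi, lo), (pm, pn))
      = ((l.foldl max hi, l.foldl min lo), (pm ++ pvScan max hi l, pn ++ pvScan min lo l)) := by
  induction l with
  | nil => intro hi lo pm pn; simp [pvScan]
  | cons s t ih =>
      intro hi lo pm pn
      simp only [List.foldl_cons, pvBStep, pvScan, ih]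
      simp

-- counting strict rises over zip of the scan with its shift equals pvCntB
theorem pv_zipcnt_max (l : List Int) : ∀ (c : Int) (acc : Int),
    ((pvScan max c l).zip (c :: pvScan max c l)).foldl
      (fun acc ab => if ab.1 > ab.2 then acc + 1 else acc) acc = acc + pvCntB c l := by
  induction l with
  | nil => intro c acc; simp [pvScan, pvCntB]
  | cons s t ih =>
      intro c acc
      simp only [pvScan, List.zip_cons_cons, List.foldl_cons, pvCntB]
      rw [ih]
      by_cases h : s > c
      · rw [max_eq_right (le_of_lt h)]
        simp [h]
        omega
      · rw [max_eq_left (by omega : s ≤ c)]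
        simp [h]

theorem pv_zipcnt_min (l : List Int) : ∀ (c : Int) (acc : Int),
    ((pvScan min c l).zip (c :: pvScan min c l)).foldl
      (fun acc ab => if ab.1 < ab.2 then acc + 1 else acc) acc = acc + pvCntW c l := by
  induction l with
  | nil => intro c acc; simp [pvScan, pvCntW]
  | cons s t ih =>
      intro c acc
      simp only [pvScan, List.zip_cons_cons, List.foldl_cons, pvCntW]
      rw [ih]
      by_cases h : s < c
      · rw [min_eq_right (le_of_lt h)]
        simp [h]
        omega
      · rw [min_eq_left (by omega : c ≤ s)]
        simp [h]

-- ===== VERDICT (by name: the statement is the Claim_ definition above) =====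
theorem breakingRecords_spec : Claim_equal_breakingRecords := by
  intro scores _ hpre
  unfold Spec_breakingRecords
  match scores with
  | [] => exact absurd rfl hpre
  | m :: rest =>
      unfold breakingRecords breakingRecords_alt
      simp only [PySem.List.slice_from_one, List.tail_cons]
      have hA := pv_afold m rest [] [] (by simp)
      simp only [List.foldl_nil, List.length_nil, Nat.cast_zero, zero_add] at hA
      rw [pv_bfold]
      have hscan_max : pvScan max m (m :: rest) = m :: pvScan max m rest := by
        simp [pvScan]
      have hscan_min : pvScan min m (m :: rest) = m :: pvScan min m rest := by
        simp [pvScan]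
      simp only [List.nil_append, hscan_max, hscan_min, List.tail_cons]
      rw [pv_zipcnt_max, pv_zipcnt_min, hA.1, hA.2]
      simp
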